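-- pv_equiv track=rewrite | github.com/Appolloyon/Rediting | rediting/util/sequence.py | compare_seqs
-- ===== SOURCE A (Python) =====
-- def compare_seqs(seq1, seq2, num_equal):
--     """Compare substrings to determine start of alignment"""
--     equal = 0
--     for i, (r1, r2) in enumerate(zip(seq1, seq2)):
--         if i == 0:  # Terminal residue
--             if r1 != '-' and r2 != '-':  # Neither should be a gap
--                 if r1 == r2:
--                     equal += 1
--                 else:
--                     pass
--             else:
--                 # If the terminal residue includes a gap then we
--                 # return False immediately
--                 return False
--         else:  # Non-terminal residues
--             if r1 == r2:
--                 equal += 1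
--             else:
--                 pass
--     if equal >= num_equal:  # Arbitrary threshold
--         # True indicates that we have sufficient similarity to
--         # count the sequences as well aligned
--         return True
--     else:
--         return False
-- ===== SOURCE B (Python) =====
-- def _matches(seq1, seq2, lo, hi):
--     """Divide-and-conquer count of positions in [lo, hi) where the sequences agree."""
--     span = hi - lo
--     if span <= 0:
--         return 0
--     if span == 1:
--         return 1 if seq1[lo] == seq2[lo] else 0
--     mid = (lo + hi) // 2
--     return _matches(seq1, seq2, lo, mid) + _matches(seq1, seq2, mid, hi)
--
-- def compare_seqs(seq1, seq2, num_equal):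
--     """Compare substrings to determine start of alignment"""
--     if seq1 and seq2 and '-' in (seq1[0], seq2[0]):
--         # terminal residue includes a gap: poorly aligned by definition
--         return False
--     m = min(len(seq1), len(seq2))
--     return _matches(seq1, seq2, 0, m) >= num_equal
-- ===== Notes on version B (the rewrite author's own statement) =====
-- stated objective: alternative
-- what changed: Replaces A's single indexed loop over enumerate(zip(...)) with a one-time terminal-gap precheck followed by a divide-and-conquer recursion that counts matching positions by splitting the index interval in half.
import Mathlib
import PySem

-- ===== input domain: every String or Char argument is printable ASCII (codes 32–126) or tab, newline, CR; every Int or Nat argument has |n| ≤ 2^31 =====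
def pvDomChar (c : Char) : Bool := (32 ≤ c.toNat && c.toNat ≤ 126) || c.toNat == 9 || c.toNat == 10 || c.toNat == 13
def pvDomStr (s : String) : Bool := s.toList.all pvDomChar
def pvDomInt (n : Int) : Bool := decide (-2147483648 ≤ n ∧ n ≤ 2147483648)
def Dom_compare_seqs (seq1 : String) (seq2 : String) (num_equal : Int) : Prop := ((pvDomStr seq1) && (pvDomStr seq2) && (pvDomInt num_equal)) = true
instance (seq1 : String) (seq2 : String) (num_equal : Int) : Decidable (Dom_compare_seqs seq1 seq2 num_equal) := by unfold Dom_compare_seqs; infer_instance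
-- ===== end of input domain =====

-- B replaces A's single indexed loop with a one-time terminal-gap precheck followed by a
-- divide-and-conquer recursion counting matching positions (objective: alternative).


-- ===== PORT A =====
-- the for-loop over enumerate(zip(seq1,seq2)) with early return False, as structural recursion
def compareSeqsGoA : List (Char × Char) → Nat → Int → Int → Bool
  | [], _, equal, num_equal => decide (equal ≥ num_equal)
  | (r1, r2) :: rest, i, equal, num_equal =>
    if i = 0 then
      if r1 ≠ '-' ∧ r2 ≠ '-' then
        compareSeqsGoA rest (i + 1) (if r1 = r2 then equal + 1 else equal) num_equal
      else
        false
    else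
      compareSeqsGoA rest (i + 1) (if r1 = r2 then equal + 1 else equal) num_equal

def compare_seqs (seq1 : String) (seq2 : String) (num_equal : Int) : Bool :=
  compareSeqsGoA (seq1.toList.zip seq2.toList) 0 0 num_equal

-- ===== PORT B =====
-- _matches: divide-and-conquer count of agreeing positions in [lo, hi); every call keeps
-- 0 ≤ lo ≤ hi within both lengths, where pyGet?-option equality is exactly seq1[lo]==seq2[lo]
def matchesB (l1 l2 : List Char) (lo hi : Int) : Int :=
  if _h0 : hi - lo ≤ 0 then 0
  else if _h1 : hi - lo = 1 then
    if PySem.List.pyGet? l1 lo = PySem.List.pyGet? l2 lo then 1 else 0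
  else
    matchesB l1 l2 lo (PySem.Int.floordiv (lo + hi) 2) +
      matchesB l1 l2 (PySem.Int.floordiv (lo + hi) 2) hi
termination_by (hi - lo).toNat
decreasing_by
  all_goals
    have hm : PySem.Int.floordiv (lo + hi) 2 = (lo + hi) / 2 :=
      PySem.Int.floordiv_eq_ediv_of_pos (by omega)
    rw [hm]; omega

def compare_seqs_alt (seq1 : String) (seq2 : String) (num_equal : Int) : Bool :=
  if seq1.toList ≠ [] ∧ seq2.toList ≠ [] ∧
      (PySem.List.pyGet? seq1.toList 0 = some '-' ∨ PySem.List.pyGet? seq2.toList 0 = some '-') then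
    false
  else
    decide (matchesB seq1.toList seq2.toList 0 (min seq1.toList.length seq2.toList.length : Nat) ≥ num_equal)

-- ===== PRECONDITION & SPEC =====
def Spec_compare_seqs (seq1 : String) (seq2 : String) (num_equal : Int) (out : Bool) : Prop := out = compare_seqs_alt seq1 seq2 num_equal
instance (seq1 : String) (seq2 : String) (num_equal : Int) (out : Bool) : Decidable (Spec_compare_seqs seq1 seq2 num_equal out) := by unfold Spec_compare_seqs; infer_instance

-- ===== CLAIM =====
def Claim_equal_compare_seqs : Prop := ∀ (seq1 : String) (seq2 : String) (num_equal : Int), Dom_compare_seqs seq1 seq2 num_equal → Spec_compare_seqs seq1 seq2 num_equal (compare_seqs seq1 seq2 num_equal)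

-- ===== LEMMAS AND PROOFS =====
-- past index 0, A's loop just adds the match count of the remaining pairs
theorem compareSeqsGoA_pos (l : List (Char × Char)) (i : Nat) (equal num_equal : Int)
    (hi : i ≠ 0) :
    compareSeqsGoA l i equal num_equal
      = decide (equal + (l.countP (fun p => p.1 == p.2) : Int) ≥ num_equal) := by
  induction l generalizing i equal with
  | nil => simp [compareSeqsGoA]
  | cons p rest ih =>
    obtain ⟨r1, r2⟩ := p
    simp only [compareSeqsGoA, if_neg hi]
    rw [ih (i + 1) _ (by omega)]
    by_cases h : r1 = r2 <;>
      · simp only [List.countP_cons, if_pos, decide_eq_decide,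
          ge_iff_le, beq_iff_eq, if_false, h]
        push_cast
        omega

-- B's divide-and-conquer over [lo, lo+n) counts the matches of the corresponding zip window
theorem matchesB_eq_countP (l1 l2 : List Char) (n : Nat) :
    ∀ (lo : Int), 0 ≤ lo → lo.toNat + n ≤ (l1.zip l2).length →
    matchesB l1 l2 lo (lo + n)
      = ((((l1.zip l2).drop lo.toNat).take n).countP (fun p => p.1 == p.2) : Int) := by
  induction n using Nat.strong_induction_on with
  | _ n ih =>
    intro lo hlo hn
    match n with
    | 0 => rw [matchesB]; simp
    | 1 =>
      rw [matchesB]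
      have hlen : lo.toNat < (l1.zip l2).length := by omega
      have h1 : lo.toNat < l1.length := by simp [List.length_zip] at hlen; omega
      have h2 : lo.toNat < l2.length := by simp [List.length_zip] at hlen; omega
      have hg1 : PySem.List.pyGet? l1 lo = some l1[lo.toNat] :=
        PySem.List.pyGet?_eq_some_getElem l1 hlo (by omega)
      have hg2 : PySem.List.pyGet? l2 lo = some l2[lo.toNat] :=
        PySem.List.pyGet?_eq_some_getElem l2 hlo (by omega)
      have hdrop : (l1.zip l2).drop lo.toNat
          = (l1[lo.toNat], l2[lo.toNat]) :: ((l1.zip l2).drop (lo.toNat + 1)) := by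
        rw [List.drop_eq_getElem_cons hlen]; simp
      rw [hdrop]
      simp only [List.take_succ_cons, List.take_zero, List.countP_cons, List.countP_nil,
        hg1, hg2]
      by_cases h : l1[lo.toNat] = l2[lo.toNat] <;> simp [h]
    | (k + 2) =>
      rw [matchesB]
      rw [dif_neg (by push_cast; omega), dif_neg (by push_cast; omega)]
      have hmid : PySem.Int.floordiv (lo + (lo + ((k + 2 : Nat) : Int))) 2
          = (lo + (lo + ((k + 2 : Nat) : Int))) / 2 :=
        PySem.Int.floordiv_eq_ediv_of_pos (by omega)
      rw [hmid]
      set mid : Int := (lo + (lo + ((k + 2 : Nat) : Int))) / 2 with hm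
      have hb1 : lo + 1 ≤ mid := by rw [hm]; push_cast; omega
      have hb2 : mid ≤ lo + ((k + 2 : Nat) : Int) - 1 := by rw [hm]; push_cast; omega
      set a : Nat := (mid - lo).toNat with hadef
      have hmidlo : mid = lo + (a : Int) := by omega
      have ha1 : 1 ≤ a := by omega
      have ha2 : a ≤ k + 1 := by push_cast at hb2; omega
      have hL : matchesB l1 l2 lo mid
          = ((((l1.zip l2).drop lo.toNat).take a).countP (fun p => p.1 == p.2) : Int) := by
        rw [hmidlo]; exact ih a (by omega) lo hlo (by omega)
      have hmtn : mid.toNat = lo.toNat + a := by omega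
      have hR : matchesB l1 l2 mid (lo + ((k + 2 : Nat) : Int))
          = ((((l1.zip l2).drop (lo.toNat + a)).take (k + 2 - a)).countP
              (fun p => p.1 == p.2) : Int) := by
        have harg : lo + ((k + 2 : Nat) : Int) = mid + ((k + 2 - a : Nat) : Int) := by
          rw [hmidlo]; push_cast; omega
        rw [harg]
        have h := ih (k + 2 - a) (by omega) mid (by omega) (by omega)
        rwa [hmtn] at h
      rw [hL, hR]
      have hsplit : ((l1.zip l2).drop lo.toNat).take (k + 2)
          = ((l1.zip l2).drop lo.toNat).take a
            ++ ((l1.zip l2).drop (lo.toNat + a)).take (k + 2 - a) := by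
        rw [← List.drop_drop]
        conv_lhs => rw [show k + 2 = a + (k + 2 - a) by omega]
        rw [List.take_add]
      rw [hsplit, List.countP_append]
      push_cast
      ring

theorem compare_seqs_spec : Claim_equal_compare_seqs := by
  intro seq1 seq2 num_equal _hdom
  unfold Spec_compare_seqs compare_seqs compare_seqs_alt
  have hcount : matchesB seq1.toList seq2.toList 0
        (min seq1.toList.length seq2.toList.length : Nat)
      = (((seq1.toList.zip seq2.toList).countP (fun p => p.1 == p.2)) : Int) := by
    have h := matchesB_eq_countP seq1.toList seq2.toList
      (min seq1.toList.length seq2.toList.length) 0 le_rfl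
      (by simp [List.length_zip])
    simpa [List.length_zip, List.take_of_length_le] using h
  cases h1 : seq1.toList with
  | nil =>
    simp [compareSeqsGoA]
    rw [show matchesB [] seq2.toList 0 0 = 0 from by rw [matchesB]; simp]
  | cons c1 t1 =>
    cases h2 : seq2.toList with
    | nil =>
      simp [compareSeqsGoA]
      rw [show matchesB (c1 :: t1) [] 0 0 = 0 from by rw [matchesB]; simp]
    | cons c2 t2 =>
      rw [h1, h2] at hcount
      simp only [List.zip_cons_cons] at hcount ⊢
      by_cases hg : c1 = '-' ∨ c2 = '-'
      · rw [if_pos ⟨List.cons_ne_nil _ _, List.cons_ne_nil _ _, by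
          simp only [PySem.List.pyGet?_zero_cons, Option.some.injEq]
          tauto⟩]
        rcases hg with hg | hg <;> simp [hg, compareSeqsGoA]
      · rw [not_or] at hg
        have hA : compareSeqsGoA ((c1, c2) :: t1.zip t2) 0 0 num_equal
            = compareSeqsGoA (t1.zip t2) 1 (if c1 = c2 then 0 + 1 else 0) num_equal := by
          simp [compareSeqsGoA, hg.1, hg.2]
        rw [hA, compareSeqsGoA_pos _ 1 _ _ one_ne_zero]
        have hcond : ¬((c1 :: t1) ≠ [] ∧ (c2 :: t2) ≠ [] ∧
            (PySem.List.pyGet? (c1 :: t1) 0 = some '-' ∨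
              PySem.List.pyGet? (c2 :: t2) 0 = some '-')) := by
          simp only [PySem.List.pyGet?_zero_cons, Option.some.injEq]
          tauto
        rw [if_neg hcond]
        rw [hcount]
        by_cases h : c1 = c2 <;>
          · simp only [h, List.countP_cons, decide_eq_decide, ge_iff_le, beq_iff_eq, reduceIte,
              beq_self_eq_true]
            push_cast
            omega
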